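-- pv_equiv track=rewrite | github.com/alishalabi/practice_2024 | coding_problems/advanced_list_sorting.py | advanced_sort
-- ===== SOURCE A (Python) =====
-- def advanced_sort(array):
--     ret = []
--     map = {}
--     current_index = 0
--     for item in array:
--         if item not in map:
--             map[item] = current_index
--             current_index += 1
--             ret.append([item])
--         else:
--             ret_index = map[item]
--             ret[ret_index].append(item)
--
--     return ret
-- ===== SOURCE B (Python) =====
-- def advanced_sort(array):
--     distinct = []
--     for item in array:
--         if item not in distinct:
--             distinct.append(item)
--     return [[x for x in array if x == k] for k in distinct]
-- ===== Notes on version B (the rewrite author's own statement) =====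
-- stated objective: alternative
-- what changed: Replaces A's single hash-indexed pass (item-to-index dict plus in-place appends into the growing result) with two dict-free staged passes: first collect the distinct values in first-appearance order into a plain list, then build each group by filtering the whole array for that value.
import Mathlib
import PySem

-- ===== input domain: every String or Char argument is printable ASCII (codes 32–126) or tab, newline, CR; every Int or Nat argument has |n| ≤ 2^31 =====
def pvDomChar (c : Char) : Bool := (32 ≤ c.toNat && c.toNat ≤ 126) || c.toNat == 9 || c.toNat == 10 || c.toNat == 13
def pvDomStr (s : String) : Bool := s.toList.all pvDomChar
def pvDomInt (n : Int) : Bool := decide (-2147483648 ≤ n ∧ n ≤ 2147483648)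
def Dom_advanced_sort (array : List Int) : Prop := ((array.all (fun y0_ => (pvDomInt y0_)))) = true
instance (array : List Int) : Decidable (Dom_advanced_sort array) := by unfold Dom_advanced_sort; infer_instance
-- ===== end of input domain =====

-- B replaces A's single hash-indexed pass (item→index dict, in-place appends into the growing result)
-- with two dict-free staged passes: collect distinct values in first-appearance order, then build each
-- group by filtering the whole array (objective: alternative).

-- ===== PORT A =====
def advanced_sort (array : List Int) : List (List Int) :=
  (array.foldl
    (fun (s : List (List Int) × PySem.Dict Int Int × Int) item =>
      if s.2.1.contains item = false then
        (s.1 ++ [[item]], s.2.1.insert item s.2.2, s.2.2 + 1)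
      else
        -- ret_index = map[item]: the key is present in this branch, so getD is exact
        -- ret[ret_index].append(item): ret_index is always in range here, so pyGetD/pySetD are exact
        (PySem.List.pySetD s.1 (s.2.1.getD item 0)
           (PySem.List.pyGetD s.1 (s.2.1.getD item 0) [] ++ [item]), s.2.1, s.2.2))
    ([], PySem.Dict.empty, 0)).1

-- ===== PORT B =====
-- pass 1: 'for item in array: if item not in distinct: distinct.append(item)'
-- pass 2: '[[x for x in array if x == k] for k in distinct]'
def advanced_sort_alt (array : List Int) : List (List Int) :=
  (array.foldl
      (fun (distinct : List Int) item =>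
        if distinct.contains item then distinct else distinct ++ [item]) []).map
    (fun k => array.filter (fun x => x == k))

-- ===== PRECONDITION & SPEC =====
def Spec_advanced_sort (array : List Int) (out : List (List Int)) : Prop := out = advanced_sort_alt array
instance (array : List Int) (out : List (List Int)) : Decidable (Spec_advanced_sort array out) := by unfold Spec_advanced_sort; infer_instance

-- ===== CLAIM (what is proved, stated in full; the proofs are below) =====
def Claim_equal_advanced_sort : Prop := ∀ (array : List Int), Dom_advanced_sort array → Spec_advanced_sort array (advanced_sort array)

-- ===== LEMMAS AND PROOFS =====

-- the canonical grouping both programs compute: keys in first-appearance order, each with its occurrences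
def pvGroups (l : List Int) : List (List Int) :=
  (PySem.Set.ofList l).map (fun k => l.filter (fun x => x == k))

theorem advanced_sort_alt_eq (array : List Int) : advanced_sort_alt array = pvGroups array := by
  unfold advanced_sort_alt pvGroups
  congr 1

theorem pvGroups_append_not_mem (p : List Int) (x : Int) (hx : x ∉ p) :
    pvGroups (p ++ [x]) = pvGroups p ++ [[x]] := by
  unfold pvGroups
  rw [PySem.Set.ofList_append_singleton,
      PySem.Set.add_of_not_mem (by simpa [PySem.Set.mem_ofList] using hx)]
  rw [List.map_append]
  congr 1
  · apply List.map_congr_left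
    intro k hk
    have hkx : x ≠ k := by
      intro h; exact hx (by simpa [PySem.Set.mem_ofList, h] using hk)
    simp [List.filter_append, hkx]
  · have : p.filter (fun y => y == x) = [] := by
      rw [List.filter_eq_nil_iff]
      intro y hy hyx
      exact hx (by simpa using (by simpa using hyx) ▸ hy)
    simp [List.filter_append, this]

theorem pvGroups_append_mem (p : List Int) (x : Int) (hx : x ∈ p) :
    pvGroups (p ++ [x]) =
      (pvGroups p).set ((PySem.Set.ofList p).idxOf x)
        (p.filter (fun y => y == x) ++ [x]) := by
  unfold pvGroups
  have hset : PySem.Set.ofList (p ++ [x]) = PySem.Set.ofList p := by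
    rw [PySem.Set.ofList_append_singleton,
        PySem.Set.add_of_mem (by simpa [PySem.Set.mem_ofList] using hx)]
  rw [hset]
  have hmem : x ∈ PySem.Set.ofList p := by simpa [PySem.Set.mem_ofList] using hx
  have hlt : (PySem.Set.ofList p).idxOf x < (PySem.Set.ofList p).length :=
    List.idxOf_lt_length_of_mem hmem
  apply List.ext_getElem
  · simp
  · intro j h1 h2
    simp only [List.getElem_map, List.getElem_set] at *
    have hjlen : j < (PySem.Set.ofList p).length := by simpa using h1
    by_cases hj : (PySem.Set.ofList p).idxOf x = j
    · subst hj
      rw [if_pos rfl, List.getElem_idxOf hlt]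
      simp [List.filter_append]
    · rw [if_neg hj]
      have hne : x ≠ (PySem.Set.ofList p)[j] := by
        intro h
        apply hj
        exact ((PySem.Set.nodup_ofList (xs := p)).getElem_inj_iff
          (i := (PySem.Set.ofList p).idxOf x) (j := j)).mp
          (by rw [List.getElem_idxOf hlt, h])
      simp [List.filter_append, hne]

theorem pvA_loop (l : List Int) : ∀ (p : List Int) (ret : List (List Int))
    (m : PySem.Dict Int Int) (ci : Int),
    ret = pvGroups p →
    (∀ k, m.contains k = decide (k ∈ p)) →
    (∀ k, k ∈ p → m.get? k = some (((PySem.Set.ofList p).idxOf k : Nat) : Int)) →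
    ci = (((PySem.Set.ofList p).length : Nat) : Int) →
    (l.foldl
      (fun (s : List (List Int) × PySem.Dict Int Int × Int) item =>
        if s.2.1.contains item = false then
          (s.1 ++ [[item]], s.2.1.insert item s.2.2, s.2.2 + 1)
        else
          (PySem.List.pySetD s.1 (s.2.1.getD item 0)
             (PySem.List.pyGetD s.1 (s.2.1.getD item 0) [] ++ [item]), s.2.1, s.2.2))
      (ret, m, ci)).1 = pvGroups (p ++ l) := by
  induction l with
  | nil => intro p ret m ci hret _ _ _; simpa using hret
  | cons x l ih =>
    intro p ret m ci hret hcont hget hci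
    rw [List.foldl_cons]
    by_cases hx : x ∈ p
    · -- seen before: append into the existing group
      have hc : m.contains x = true := by rw [hcont]; simp [hx]
      have hmem : x ∈ PySem.Set.ofList p := by simpa [PySem.Set.mem_ofList] using hx
      have hlt : (PySem.Set.ofList p).idxOf x < (PySem.Set.ofList p).length :=
        List.idxOf_lt_length_of_mem hmem
      have hgd : m.getD x 0 = (((PySem.Set.ofList p).idxOf x : Nat) : Int) := by
        rw [PySem.Dict.getD_eq_get?_getD, hget x hx]; rfl
      simp only [hc, Bool.true_eq_false, if_false, hgd, hret,
        PySem.List.pySetD_natCast, PySem.List.pyGetD_natCast]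
      have hretval : (pvGroups p).getD ((PySem.Set.ofList p).idxOf x) [] =
          p.filter (fun y => y == x) := by
        unfold pvGroups
        rw [List.getD_eq_getElem _ _ (by simpa using hlt), List.getElem_map,
          List.getElem_idxOf]
      rw [hretval]
      have := ih (p ++ [x])
        ((pvGroups p).set ((PySem.Set.ofList p).idxOf x) (p.filter (fun y => y == x) ++ [x]))
        m ci
        (by rw [pvGroups_append_mem p x hx])
        (by
          intro k
          rw [hcont]
          simp only [decide_eq_decide, List.mem_append, List.mem_singleton]
          constructor
          · exact Or.inl
          · rintro (h | h)
            · exact h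
            · exact h ▸ hx)
        (by
          intro k hk
          have hkp : k ∈ p := by
            rcases List.mem_append.mp hk with h | h
            · exact h
            · simp at h; exact h ▸ hx
          rw [hget k hkp]
          congr 2
          rw [PySem.Set.ofList_append_singleton,
            PySem.Set.add_of_mem (by simpa [PySem.Set.mem_ofList] using hx)])
        (by
          rw [hci]
          congr 2
          rw [PySem.Set.ofList_append_singleton,
            PySem.Set.add_of_mem (by simpa [PySem.Set.mem_ofList] using hx)])
      rw [this, List.append_assoc, List.singleton_append]
    · -- first appearance: start a new group
      have hc : m.contains x = false := by rw [hcont]; simp [hx]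
      have hnmem : x ∉ PySem.Set.ofList p := by simpa [PySem.Set.mem_ofList] using hx
      have hsetapp : PySem.Set.ofList (p ++ [x]) = PySem.Set.ofList p ++ [x] := by
        rw [PySem.Set.ofList_append_singleton, PySem.Set.add_of_not_mem hnmem]
      simp only [hc]
      simp only [if_true]
      have := ih (p ++ [x]) (ret ++ [[x]]) (m.insert x ci) (ci + 1)
        (by rw [hret, pvGroups_append_not_mem p x hx])
        (by
          intro k
          rw [PySem.Dict.contains_insert, hcont]
          simp [List.mem_append]
          by_cases hkx : k = x <;> simp [hkx])
        (by
          intro k hk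
          by_cases hkx : k = x
          · subst hkx
            rw [PySem.Dict.get?_insert_self, hci, hsetapp,
              List.idxOf_append_of_notMem hnmem]
            simp
          · have hkp : k ∈ p := by
              rcases List.mem_append.mp hk with h | h
              · exact h
              · simp at h; exact absurd h hkx
            rw [PySem.Dict.get?_insert_of_ne m ci hkx, hsetapp,
              List.idxOf_append_of_mem (by simpa [PySem.Set.mem_ofList] using hkp),
              hget k hkp])
        (by rw [hci, hsetapp]; simp)
      rw [this, List.append_assoc, List.singleton_append]

theorem advanced_sort_eq (array : List Int) : advanced_sort array = pvGroups array := by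
  unfold advanced_sort
  have := pvA_loop array [] [] PySem.Dict.empty 0
    rfl (by intro k; simp [PySem.Dict.contains_empty]) (by intro k hk; simp at hk) rfl
  simpa using this

-- ===== VERDICT (by name: the statement is the Claim_ definition above) =====
theorem advanced_sort_spec : Claim_equal_advanced_sort := by
  intro array _
  unfold Spec_advanced_sort
  rw [advanced_sort_eq, advanced_sort_alt_eq]
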